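-- pv_equiv track=rewrite | github.com/MrBrantCode/unitest_baseline | mut_generate/mist_train_taco/taco_212/solution.py | get_fizzbuzz_substring
-- ===== SOURCE A (Python) =====
-- def get_fizzbuzz_substring(s: int) -> str:
--     def calc_start(mid: int) -> int:
--         cnt = -1
--         i = 1
--         while 10 ** i < mid:
--             cnt += i * (10 ** i - 10 ** (i - 1))
--             fif = (10 ** i - 1) // 15 - (10 ** (i - 1) - 1) // 15
--             three = (10 ** i - 1) // 3 - (10 ** (i - 1) - 1) // 3
--             five = (10 ** i - 1) // 5 - (10 ** (i - 1) - 1) // 5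
--             cnt += (three + five) * 4 - (three + five - fif) * i
--             i += 1
--         cnt += i * (mid - 10 ** (i - 1))
--         fif = (mid - 1) // 15 - (10 ** (i - 1) - 1) // 15
--         three = (mid - 1) // 3 - (10 ** (i - 1) - 1) // 3
--         five = (mid - 1) // 5 - (10 ** (i - 1) - 1) // 5
--         cnt += (three + five) * 4 - (three + five - fif) * i
--         return cnt + 1
--
--     N = s - 1
--     (left, right) = (1, 10 ** 18)
--     while left + 1 < right:
--         mid = (left + right) // 2
--         start = calc_start(mid)
--         if start <= N:
--             left = mid
--         else:
--             right = mid
--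
--     ans = ''
--     for i in range(left, left + 30):
--         tmp = ''
--         if i % 3 == 0:
--             tmp += 'Fizz'
--         if i % 5 == 0:
--             tmp += 'Buzz'
--         if not tmp:
--             tmp = str(i)
--         ans += tmp
--
--     start = calc_start(left)
--     return ans[N - start:N - start + 20]
-- ===== SOURCE B (Python) =====
-- def get_fizzbuzz_substring(s: int) -> str:
--     N = s - 1
--
--     def seg_len(d: int, lo: int, hi: int) -> int:
--         # total length of the FizzBuzz tokens of the d-digit numbers in [lo, hi)
--         t = (hi - 1) // 3 - (lo - 1) // 3
--         f = (hi - 1) // 5 - (lo - 1) // 5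
--         ft = (hi - 1) // 15 - (lo - 1) // 15
--         return d * (hi - lo) + (t + f) * 4 - (t + f - ft) * d
--
--     # walk the digit-length blocks, accumulating prefix lengths, to find the bucket
--     d, lo, base = 18, 10 ** 17, 0
--     for e in range(1, 19):
--         b = seg_len(e, 10 ** (e - 1), 10 ** e)
--         if base + b > N:
--             d, lo = e, 10 ** (e - 1)
--             break
--         base += b
--
--     # largest n in [lo, 10**d) whose string starts at or before position N
--     lo2, hi2 = lo, 10 ** d
--     while lo2 + 1 < hi2:
--         mid = (lo2 + hi2) // 2
--         if base + seg_len(d, lo, mid) <= N: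
--             lo2 = mid
--         else:
--             hi2 = mid
--     left = lo2
--
--     start = base + seg_len(d, lo, left)
--     toks = []
--     for i in range(left, left + 30):
--         t = ('Fizz' if i % 3 == 0 else '') + ('Buzz' if i % 5 == 0 else '')
--         toks.append(t if t else str(i))
--     ans = ''.join(toks)
--     return ans[N - start:N - start + 20]
-- ===== Notes on version B (the rewrite author's own statement) =====
-- stated objective: alternative
-- what changed: Replaces A's single binary search over the whole numeric range (whose comparator re-runs a digit-block while-loop on every probe) by a linear walk over the digit-length blocks with a closed-form per-block length, followed by a small binary search inside the identified block only; the token window is built as a joined token list instead of string accumulation.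
import Mathlib
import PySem

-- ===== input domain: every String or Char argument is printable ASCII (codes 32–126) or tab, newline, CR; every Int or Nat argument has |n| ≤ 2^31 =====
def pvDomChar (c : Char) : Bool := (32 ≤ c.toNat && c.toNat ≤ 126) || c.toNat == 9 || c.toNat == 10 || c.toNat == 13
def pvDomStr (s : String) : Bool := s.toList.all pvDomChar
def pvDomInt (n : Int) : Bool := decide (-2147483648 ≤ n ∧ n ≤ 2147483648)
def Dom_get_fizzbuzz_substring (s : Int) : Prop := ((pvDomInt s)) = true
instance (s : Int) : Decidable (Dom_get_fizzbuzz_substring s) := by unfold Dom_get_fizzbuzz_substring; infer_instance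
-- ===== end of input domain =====

-- B replaces A's single global binary search over the whole range by a walk over the
-- digit-length blocks (closed-form block lengths) plus a binary search inside the
-- found block only, and joins a token list instead of accumulating a string
-- (alternative decomposition, same exact output).

-- ===== PORT A =====
-- while 10**i < mid: accumulate block lengths; then the partial last block; returns cnt+1
-- (fuel makes the recursion structural; 64 fuel is never exhausted for the arguments A produces)
def pvCalcExit (mid cnt : Int) (i : Nat) : Int :=
  let fif := PySem.Int.floordiv (mid - 1) 15 - PySem.Int.floordiv ((10:Int)^(i-1) - 1) 15
  let three := PySem.Int.floordiv (mid - 1) 3 - PySem.Int.floordiv ((10:Int)^(i-1) - 1) 3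
  let five := PySem.Int.floordiv (mid - 1) 5 - PySem.Int.floordiv ((10:Int)^(i-1) - 1) 5
  cnt + (i:Int) * (mid - (10:Int)^(i-1)) + ((three + five) * 4 - (three + five - fif) * (i:Int)) + 1

def pvCalcLoop : Nat → Int → Int → Nat → Int
  | 0, mid, cnt, i => pvCalcExit mid cnt i
  | (fuel+1), mid, cnt, i =>
    if (10:Int) ^ i < mid then
      let fif := PySem.Int.floordiv ((10:Int)^i - 1) 15 - PySem.Int.floordiv ((10:Int)^(i-1) - 1) 15
      let three := PySem.Int.floordiv ((10:Int)^i - 1) 3 - PySem.Int.floordiv ((10:Int)^(i-1) - 1) 3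
      let five := PySem.Int.floordiv ((10:Int)^i - 1) 5 - PySem.Int.floordiv ((10:Int)^(i-1) - 1) 5
      pvCalcLoop fuel mid (cnt + (i:Int) * ((10:Int)^i - (10:Int)^(i-1)) + ((three + five) * 4 - (three + five - fif) * (i:Int))) (i+1)
    else pvCalcExit mid cnt i

def pvCalcStart (mid : Int) : Int := pvCalcLoop 64 mid (-1) 1

def pvBisect : Nat → Int → Int → Int → Int
  | 0, _, left, _ => left
  | (fuel+1), N, left, right =>
    if left + 1 < right then
      let mid := PySem.Int.floordiv (left + right) 2
      if pvCalcStart mid ≤ N then pvBisect fuel N mid right else pvBisect fuel N left mid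
    else left

def pvTokenA (i : Int) : String :=
  let tmp : String := ""
  let tmp := if PySem.Int.mod i 3 = 0 then tmp ++ "Fizz" else tmp
  let tmp := if PySem.Int.mod i 5 = 0 then tmp ++ "Buzz" else tmp
  if tmp = "" then PySem.Int.toStr i else tmp

def get_fizzbuzz_substring (s : Int) : String :=
  let N := s - 1
  let left := pvBisect 64 N 1 ((10:Int) ^ 18)
  let ans := (PySem.List.pyRange left (left + 30) 1).foldl (fun acc i => acc ++ pvTokenA i) ""
  let start := pvCalcStart left
  PySem.Str.slice ans (some (N - start)) (some (N - start + 20))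

-- ===== PORT B =====
-- total token length of the d-digit numbers in [lo, hi)
def pvSegLen (d lo hi : Int) : Int :=
  let t := PySem.Int.floordiv (hi - 1) 3 - PySem.Int.floordiv (lo - 1) 3
  let f := PySem.Int.floordiv (hi - 1) 5 - PySem.Int.floordiv (lo - 1) 5
  let ft := PySem.Int.floordiv (hi - 1) 15 - PySem.Int.floordiv (lo - 1) 15
  d * (hi - lo) + (t + f) * 4 - (t + f - ft) * d

-- the 'for e in range(1,19): … break' walk; returns (d, lo, base); the Nat countdown is the loop bound
def pvBucket (N : Int) : Int → Nat → Nat → Int × Int × Int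
  | base, _, 0 => ((18:Int), (10:Int)^17, base)
  | base, e, (c+1) =>
    let b := pvSegLen (e:Int) ((10:Int)^(e-1)) ((10:Int)^e)
    if base + b > N then ((e:Int), (10:Int)^(e-1), base)
    else pvBucket N (base + b) (e+1) c

def pvBisectIn (N base d lo : Int) : Nat → Int → Int → Int
  | 0, lo2, _ => lo2
  | (fuel+1), lo2, hi2 =>
    if lo2 + 1 < hi2 then
      let mid := PySem.Int.floordiv (lo2 + hi2) 2
      if base + pvSegLen d lo mid ≤ N then pvBisectIn N base d lo fuel mid hi2
      else pvBisectIn N base d lo fuel lo2 mid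
    else lo2

def pvTokenB (i : Int) : String :=
  let t := (if PySem.Int.mod i 3 = 0 then "Fizz" else "") ++ (if PySem.Int.mod i 5 = 0 then "Buzz" else "")
  if t = "" then PySem.Int.toStr i else t

def get_fizzbuzz_substring_alt (s : Int) : String :=
  let N := s - 1
  let dlb := pvBucket N 0 1 18
  let d := dlb.1
  let lo := dlb.2.1
  let base := dlb.2.2
  let left := pvBisectIn N base d lo 64 lo ((10:Int) ^ d.toNat)
  let start := base + pvSegLen d lo left
  let ans := String.join ((PySem.List.pyRange left (left + 30) 1).map pvTokenB)
  PySem.Str.slice ans (some (N - start)) (some (N - start + 20))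

-- ===== PRECONDITION & SPEC =====
def Spec_get_fizzbuzz_substring (s : Int) (out : String) : Prop := out = get_fizzbuzz_substring_alt s
instance (s : Int) (out : String) : Decidable (Spec_get_fizzbuzz_substring s out) := by unfold Spec_get_fizzbuzz_substring; infer_instance

-- ===== CLAIM (what is proved, stated in full; the proofs are below) =====
def Claim_equal_get_fizzbuzz_substring : Prop := ∀ (s : Int), Dom_get_fizzbuzz_substring s → Spec_get_fizzbuzz_substring s (get_fizzbuzz_substring s)

-- ===== LEMMAS AND PROOFS =====

-- prefix sums of full-block lengths: pvS n = total length of the FizzBuzz string of 1..10^n - 1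
def pvS : Nat → Int
  | 0 => 0
  | n+1 => pvS n + pvSegLen ((n:Int)+1) ((10:Int)^n) ((10:Int)^(n+1))

lemma pvSegLen_self (d lo : Int) : pvSegLen d lo lo = 0 := by
  unfold pvSegLen; ring

lemma pow10_lt (a b : Nat) (h : a < b) : (10:Int)^a < (10:Int)^b :=
  pow_lt_pow_right₀ (by norm_num) h

lemma pow10_le (a b : Nat) (h : a ≤ b) : (10:Int)^a ≤ (10:Int)^b :=
  pow_le_pow_right₀ (by norm_num) h

lemma calcExit_eq (m cnt : Int) (d' : Nat) :
    pvCalcExit m cnt (d'+1) = cnt + pvSegLen ((d':Int)+1) ((10:Int)^d') m + 1 := by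
  unfold pvCalcExit pvSegLen
  simp only [Nat.add_sub_cancel]
  push_cast
  ring

lemma calcLoop_eq : ∀ (k fuel d' : Nat) (m cnt : Int) (i' : Nat), d' - i' = k → k ≤ fuel → i' ≤ d' →
    (10:Int)^d' < m → m ≤ (10:Int)^(d'+1) →
    pvCalcLoop fuel m cnt (i'+1) = cnt + (pvS d' - pvS i') + pvSegLen ((d':Int)+1) ((10:Int)^d') m + 1 := by
  intro k
  induction k with
  | zero =>
    intro fuel d' m cnt i' hk hkf hle hm1 hm2
    have hid : i' = d' := by omega
    subst hid
    have hexit : pvCalcLoop fuel m cnt (i'+1) = pvCalcExit m cnt (i'+1) := by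
      cases fuel with
      | zero => simp only [pvCalcLoop]
      | succ f =>
        simp only [pvCalcLoop]
        rw [if_neg (by omega : ¬ (10:Int)^(i'+1) < m)]
    rw [hexit, calcExit_eq]
    omega
  | succ k ih =>
    intro fuel d' m cnt i' hk hkf hle hm1 hm2
    have hlt : i' < d' := by omega
    have hcond : (10:Int)^(i'+1) < m := by
      have := pow10_le (i'+1) d' (by omega)
      omega
    cases fuel with
    | zero => omega
    | succ f =>
      simp only [pvCalcLoop]
      rw [if_pos hcond]
      simp only [Nat.add_sub_cancel]
      rw [ih f d' m _ (i'+1) (by omega) (by omega) (by omega) hm1 hm2]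
      have hs : pvS (i'+1) = pvS i' + pvSegLen ((i':Int)+1) ((10:Int)^i') ((10:Int)^(i'+1)) := by
        simp [pvS]
      rw [show pvS d' - pvS (i'+1) = pvS d' - (pvS i' + pvSegLen ((i':Int)+1) ((10:Int)^i') ((10:Int)^(i'+1))) by rw [← hs]]
      unfold pvSegLen
      push_cast
      ring

lemma calcStart_rep (d' : Nat) (m : Int) (hd : d' ≤ 64) (h1 : (10:Int)^d' ≤ m) (h2 : m ≤ (10:Int)^(d'+1)) :
    pvCalcStart m = pvS d' + pvSegLen ((d':Int)+1) ((10:Int)^d') m := by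
  rcases eq_or_lt_of_le h1 with heq | hlt
  · cases d' with
    | zero =>
      rw [← heq]
      decide
    | succ e =>
      have hcl := calcLoop_eq e 64 e ((10:Int)^(e+1)) (-1) 0 (by omega) (by omega) (by omega)
        (pow10_lt e (e+1) (by omega)) (le_refl _)
      unfold pvCalcStart
      rw [← heq, hcl, pvSegLen_self]
      have hs : pvS (e+1) = pvS e + pvSegLen ((e:Int)+1) ((10:Int)^e) ((10:Int)^(e+1)) := by
        simp [pvS]
      rw [hs]
      simp only [pvS]
      ring
  · have hcl := calcLoop_eq d' 64 d' m (-1) 0 (by omega) (by omega) (by omega) hlt h2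
    unfold pvCalcStart
    rw [hcl]
    have h0 : pvS 0 = 0 := rfl
    omega

lemma pv15a (m : Int) (h : ¬ m % 5 = 0) : m/15 - (m-1)/15 = 0 := by omega

lemma pv15b (m : Int) (h : ¬ m % 3 = 0) : m/15 - (m-1)/15 = 0 := by omega

lemma seg_step (D lo m : Int) (hD : 1 ≤ D) :
    pvSegLen D lo m ≤ pvSegLen D lo (m+1) := by
  have e3 : ∀ a : Int, PySem.Int.floordiv a 3 = a / 3 :=
    fun a => PySem.Int.floordiv_eq_ediv_of_pos (by norm_num)
  have e5 : ∀ a : Int, PySem.Int.floordiv a 5 = a / 5 :=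
    fun a => PySem.Int.floordiv_eq_ediv_of_pos (by norm_num)
  have e15 : ∀ a : Int, PySem.Int.floordiv a 15 = a / 15 :=
    fun a => PySem.Int.floordiv_eq_ediv_of_pos (by norm_num)
  have key : pvSegLen D lo (m+1) - pvSegLen D lo m =
      D + ((m/3 - (m-1)/3) + (m/5 - (m-1)/5)) * 4
        - ((m/3 - (m-1)/3) + (m/5 - (m-1)/5) - (m/15 - (m-1)/15)) * D := by
    unfold pvSegLen
    simp only [e3, e5, e15]
    ring_nf
  have ha : m % 15 % 3 = m % 3 := Int.emod_emod_of_dvd m (by norm_num)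
  have hb : m % 15 % 5 = m % 5 := Int.emod_emod_of_dvd m (by norm_num)
  by_cases h3 : m % 3 = 0 <;> by_cases h5 : m % 5 = 0
  · have hu : m/3 - (m-1)/3 = 1 := by omega
    have hv : m/5 - (m-1)/5 = 1 := by omega
    have hw : m/15 - (m-1)/15 = 1 := by omega
    rw [hu, hv, hw] at key; omega
  · have hu : m/3 - (m-1)/3 = 1 := by omega
    have hv : m/5 - (m-1)/5 = 0 := by omega
    have hw : m/15 - (m-1)/15 = 0 := pv15a m h5
    rw [hu, hv, hw] at key; omega
  · have hu : m/3 - (m-1)/3 = 0 := by omega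
    have hv : m/5 - (m-1)/5 = 1 := by omega
    have hw : m/15 - (m-1)/15 = 0 := pv15b m h3
    rw [hu, hv, hw] at key; omega
  · have hu : m/3 - (m-1)/3 = 0 := by omega
    have hv : m/5 - (m-1)/5 = 0 := by omega
    have hw : m/15 - (m-1)/15 = 0 := by omega
    rw [hu, hv, hw] at key; omega

lemma digit_exists : ∀ (n : Nat) (m : Int), 1 ≤ m → m < (10:Int)^n →
    ∃ d' : Nat, d' < n ∧ (10:Int)^d' ≤ m ∧ m < (10:Int)^(d'+1) := by
  intro n
  induction n with
  | zero => intro m h1 h2; simp at h2; omega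
  | succ n ih =>
    intro m h1 h2
    by_cases h : m < (10:Int)^n
    · obtain ⟨d', hd, ha, hb⟩ := ih m h1 h
      exact ⟨d', by omega, ha, hb⟩
    · exact ⟨n, by omega, by omega, h2⟩

lemma cs_step (m : Int) (h1 : 1 ≤ m) (h2 : m < (10:Int)^18) :
    pvCalcStart m ≤ pvCalcStart (m+1) := by
  obtain ⟨d', hdn, ha, hb⟩ := digit_exists 18 m h1 h2
  rw [calcStart_rep d' m (by omega) ha (by omega), calcStart_rep d' (m+1) (by omega) (by omega) (by omega)]
  have h := seg_step ((d':Int)+1) ((10:Int)^d') m (by omega)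
  omega

lemma cs_mono (a : Int) (h1 : 1 ≤ a) :
    ∀ (b : Int), a ≤ b → b ≤ (10:Int)^18 → pvCalcStart a ≤ pvCalcStart b := by
  intro b hab
  induction b, hab using Int.le_induction with
  | base => intro _; exact le_refl _
  | succ n hn ih =>
    intro hb
    have h1' : pvCalcStart n ≤ pvCalcStart (n+1) := cs_step n (by omega) (by omega)
    have := ih (by omega)
    omega

lemma Q_not_lt (N a b : Int)
    (ha1 : 1 ≤ a) (ha4 : N < pvCalcStart (a+1))
    (hb2 : b < (10:Int)^18) (hb3 : pvCalcStart b ≤ N ∨ b = 1) : ¬ a < b := by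
  intro hlt
  rcases hb3 with hb3 | hb3
  · have : pvCalcStart (a+1) ≤ pvCalcStart b := cs_mono (a+1) (by omega) b (by omega) (by omega)
    omega
  · omega

lemma Q_unique (N a b : Int)
    (ha1 : 1 ≤ a) (ha2 : a < (10:Int)^18) (ha3 : pvCalcStart a ≤ N ∨ a = 1) (ha4 : N < pvCalcStart (a+1))
    (hb1 : 1 ≤ b) (hb2 : b < (10:Int)^18) (hb3 : pvCalcStart b ≤ N ∨ b = 1) (hb4 : N < pvCalcStart (b+1)) :
    a = b := by
  have h1 := Q_not_lt N a b ha1 ha4 hb2 hb3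
  have h2 := Q_not_lt N b a hb1 hb4 ha2 ha3
  omega

lemma bisect_spec (N : Int) : ∀ (fuel : Nat) (l r : Int), r - l ≤ (2:Int)^fuel →
    1 ≤ l → l < r → r ≤ (10:Int)^18 →
    (pvCalcStart l ≤ N ∨ l = 1) → N < pvCalcStart r →
    1 ≤ pvBisect fuel N l r ∧ pvBisect fuel N l r + 1 ≤ r ∧
    (pvCalcStart (pvBisect fuel N l r) ≤ N ∨ pvBisect fuel N l r = 1) ∧
    N < pvCalcStart (pvBisect fuel N l r + 1) := by
  intro fuel
  induction fuel with
  | zero =>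
    intro l r hf h1 h2 h3 h4 h5
    simp only [pvBisect]
    norm_num at hf
    refine ⟨h1, by omega, h4, ?_⟩
    rw [show l + 1 = r by omega]
    exact h5
  | succ fuel ih =>
    intro l r hf h1 h2 h3 h4 h5
    have hpow : (2:Int)^(fuel+1) = 2 * (2:Int)^fuel := by ring
    by_cases hc : l + 1 < r
    · have hm2 : PySem.Int.floordiv (l + r) 2 = (l + r) / 2 :=
        PySem.Int.floordiv_eq_ediv_of_pos (by norm_num)
      have hmb : l < PySem.Int.floordiv (l + r) 2 ∧ PySem.Int.floordiv (l + r) 2 < r := by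
        rw [hm2]; omega
      have hg1 : PySem.Int.floordiv (l + r) 2 - l ≤ (2:Int)^fuel := by rw [hm2]; omega
      have hg2 : r - PySem.Int.floordiv (l + r) 2 ≤ (2:Int)^fuel := by rw [hm2]; omega
      by_cases hcs : pvCalcStart (PySem.Int.floordiv (l + r) 2) ≤ N
      · have heq : pvBisect (fuel+1) N l r = pvBisect fuel N (PySem.Int.floordiv (l + r) 2) r := by
          simp only [pvBisect]; rw [if_pos hc, if_pos hcs]
        rw [heq]
        exact ih _ r hg2 (by omega) hmb.2 h3 (Or.inl hcs) h5
      · have heq : pvBisect (fuel+1) N l r = pvBisect fuel N l (PySem.Int.floordiv (l + r) 2) := by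
          simp only [pvBisect]; rw [if_pos hc, if_neg hcs]
        rw [heq]
        obtain ⟨c1, c2, c3, c4⟩ := ih l _ hg1 h1 hmb.1 (by omega) h4 (by omega)
        exact ⟨c1, by omega, c3, c4⟩
    · have heq : pvBisect (fuel+1) N l r = l := by
        simp only [pvBisect]; rw [if_neg hc]
      rw [heq]
      refine ⟨h1, by omega, h4, ?_⟩
      rw [show l + 1 = r by omega]
      exact h5

lemma bisectIn_spec (N base d lo top : Int)
    (hrep : ∀ x, lo ≤ x → x ≤ top → base + pvSegLen d lo x = pvCalcStart x) :
    ∀ (fuel : Nat) (l r : Int), r - l ≤ (2:Int)^fuel →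
    lo ≤ l → l < r → r ≤ top →
    (pvCalcStart l ≤ N ∨ l = lo) → N < pvCalcStart r →
    lo ≤ pvBisectIn N base d lo fuel l r ∧ pvBisectIn N base d lo fuel l r + 1 ≤ r ∧
    (pvCalcStart (pvBisectIn N base d lo fuel l r) ≤ N ∨ pvBisectIn N base d lo fuel l r = lo) ∧
    N < pvCalcStart (pvBisectIn N base d lo fuel l r + 1) := by
  intro fuel
  induction fuel with
  | zero =>
    intro l r hf h1 h2 h3 h4 h5
    simp only [pvBisectIn]
    norm_num at hf
    refine ⟨h1, by omega, h4, ?_⟩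
    rw [show l + 1 = r by omega]
    exact h5
  | succ fuel ih =>
    intro l r hf h1 h2 h3 h4 h5
    have hpow : (2:Int)^(fuel+1) = 2 * (2:Int)^fuel := by ring
    by_cases hc : l + 1 < r
    · have hm2 : PySem.Int.floordiv (l + r) 2 = (l + r) / 2 :=
        PySem.Int.floordiv_eq_ediv_of_pos (by norm_num)
      have hmb : l < PySem.Int.floordiv (l + r) 2 ∧ PySem.Int.floordiv (l + r) 2 < r := by
        rw [hm2]; omega
      have hg1 : PySem.Int.floordiv (l + r) 2 - l ≤ (2:Int)^fuel := by rw [hm2]; omega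
      have hg2 : r - PySem.Int.floordiv (l + r) 2 ≤ (2:Int)^fuel := by rw [hm2]; omega
      have hpred : base + pvSegLen d lo (PySem.Int.floordiv (l + r) 2) =
          pvCalcStart (PySem.Int.floordiv (l + r) 2) :=
        hrep _ (by omega) (by omega)
      by_cases hcs : pvCalcStart (PySem.Int.floordiv (l + r) 2) ≤ N
      · have heq : pvBisectIn N base d lo (fuel+1) l r = pvBisectIn N base d lo fuel (PySem.Int.floordiv (l + r) 2) r := by
          simp only [pvBisectIn]
          rw [if_pos hc, if_pos (show base + pvSegLen d lo (PySem.Int.floordiv (l + r) 2) ≤ N by omega)]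
        rw [heq]
        exact ih _ r hg2 (by omega) hmb.2 h3 (Or.inl hcs) h5
      · have heq : pvBisectIn N base d lo (fuel+1) l r = pvBisectIn N base d lo fuel l (PySem.Int.floordiv (l + r) 2) := by
          simp only [pvBisectIn]
          rw [if_pos hc, if_neg (show ¬ base + pvSegLen d lo (PySem.Int.floordiv (l + r) 2) ≤ N by omega)]
        rw [heq]
        obtain ⟨c1, c2, c3, c4⟩ := ih l _ hg1 h1 hmb.1 (by omega) h4 (by omega)
        exact ⟨c1, by omega, c3, c4⟩
    · have heq : pvBisectIn N base d lo (fuel+1) l r = l := by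
        simp only [pvBisectIn]; rw [if_neg hc]
      rw [heq]
      refine ⟨h1, by omega, h4, ?_⟩
      rw [show l + 1 = r by omega]
      exact h5

lemma bucket_spec (N : Int) (hN : N < pvS 18) : ∀ (c e' : Nat) (acc : Int), 18 - e' ≤ c → e' ≤ 17 →
    acc = pvS e' → (e' = 0 ∨ acc ≤ N) →
    ∃ d' : Nat, d' ≤ 17 ∧ e' ≤ d' ∧
      pvBucket N acc (e'+1) c = (((d':Int)+1), (10:Int)^d', pvS d') ∧
      N < pvS (d'+1) ∧ (d' = 0 ∨ pvS d' ≤ N) := by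
  intro c
  induction c with
  | zero => intro e' acc hf he hacc hdis; exfalso; omega
  | succ c ih =>
    intro e' acc hf he hacc hdis
    have hfull : acc + pvSegLen ((e':Int)+1) ((10:Int)^e') ((10:Int)^(e'+1)) = pvS (e'+1) := by
      rw [hacc]; simp [pvS]
    have hcast : ((e'+1:Nat):Int) = (e':Int)+1 := by push_cast; ring
    by_cases hN' : acc + pvSegLen (((e'+1:Nat)):Int) ((10:Int)^e') ((10:Int)^(e'+1)) > N
    · have heq : pvBucket N acc (e'+1) (c+1) = ((((e'+1:Nat)):Int), (10:Int)^e', acc) := by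
        simp only [pvBucket, Nat.add_sub_cancel]
        rw [if_pos hN']
      refine ⟨e', by omega, by omega, ?_, ?_, ?_⟩
      · rw [heq, hacc]; push_cast; rfl
      · rw [hcast] at hN'
        omega
      · rcases hdis with h0 | hle
        · exact Or.inl h0
        · exact Or.inr (by rw [← hacc]; exact hle)
    · rw [hcast] at hN'
      have hSle : pvS (e'+1) ≤ N := by omega
      have h16 : e' ≤ 16 := by
        by_contra h17
        have : e' = 17 := by omega
        subst this
        norm_num at hSle
        omega
      have heq : pvBucket N acc (e'+1) (c+1) =
          pvBucket N (acc + pvSegLen (((e'+1:Nat)):Int) ((10:Int)^e') ((10:Int)^(e'+1))) (e'+1+1) c := by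
        simp only [pvBucket, Nat.add_sub_cancel]
        rw [if_neg (by rw [hcast]; omega)]
      obtain ⟨d', hd1, hd2, hd3, hd4, hd5⟩ :=
        ih (e'+1) (acc + pvSegLen (((e'+1:Nat)):Int) ((10:Int)^e') ((10:Int)^(e'+1)))
          (by omega) (by omega) (by rw [hcast]; exact hfull) (Or.inr (by rw [hcast]; omega))
      exact ⟨d', hd1, by omega, heq.trans hd3, hd4, hd5⟩

lemma token_eq : ∀ i : Int, pvTokenA i = pvTokenB i := by
  intro i
  unfold pvTokenA pvTokenB
  by_cases h3 : PySem.Int.mod i 3 = 0 <;> by_cases h5 : PySem.Int.mod i 5 = 0 <;>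
    simp only [PySem.Int.mod_eq_zero_iff_dvd] at h3 h5 <;>
    simp [h3, h5]

lemma join_map_eq_foldl (l : List Int) :
    String.join (l.map pvTokenB) = l.foldl (fun acc i => acc ++ pvTokenA i) "" := by
  have h : pvTokenB = pvTokenA := funext (fun i => (token_eq i).symm)
  rw [h]
  simp [String.join, List.foldl_map]

-- ===== VERDICT (by name: the statement is the Claim_ definition above) =====
theorem get_fizzbuzz_substring_spec : Claim_equal_get_fizzbuzz_substring := by
  intro s hdom
  unfold Spec_get_fizzbuzz_substring
  have hs : -2147483648 ≤ s ∧ s ≤ 2147483648 := by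
    have h := hdom
    unfold Dom_get_fizzbuzz_substring pvDomInt at h
    exact of_decide_eq_true h
  have hNS : (2147483647:Int) < pvS 18 := by decide
  have hNlt : s - 1 < pvS 18 := by omega
  obtain ⟨d', hd17, -, hbeq, hNd, hdis⟩ :=
    bucket_spec (s-1) hNlt 18 0 0 (by omega) (by omega) (by simp [pvS]) (Or.inl rfl)
  have hbeq' : pvBucket (s-1) 0 1 18 = (((d':Int)+1), (10:Int)^d', pvS d') := hbeq
  have hrep : ∀ x, (10:Int)^d' ≤ x → x ≤ (10:Int)^(d'+1) →
      pvS d' + pvSegLen ((d':Int)+1) ((10:Int)^d') x = pvCalcStart x :=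
    fun x hx1 hx2 => (calcStart_rep d' x (by omega) hx1 hx2).symm
  have htop : pvCalcStart ((10:Int)^(d'+1)) = pvS (d'+1) := by
    rw [calcStart_rep d' _ (by omega) (le_of_lt (pow10_lt d' (d'+1) (by omega))) (le_refl _)]
    simp [pvS]
  have hcs18 : pvCalcStart ((10:Int)^18) = pvS 18 := by
    rw [show ((10:Int)^18) = (10:Int)^(17+1) by norm_num]
    rw [calcStart_rep 17 _ (by omega) (pow10_le 17 (17+1) (by omega)) (le_refl _)]
    simp [pvS]
  have hA := bisect_spec (s-1) 64 1 ((10:Int)^18) (by norm_num)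
    (by norm_num) (by norm_num) (by norm_num) (Or.inr rfl) (by rw [hcs18]; omega)
  have hgap : (10:Int)^(d'+1) - (10:Int)^d' ≤ (2:Int)^64 := by
    have h18 : (10:Int)^(d'+1) ≤ (10:Int)^18 := pow10_le _ _ (by omega)
    have hp : (0:Int) < (10:Int)^d' := by positivity
    have : (10:Int)^18 ≤ (2:Int)^64 := by norm_num
    omega
  have hBin := bisectIn_spec (s-1) (pvS d') ((d':Int)+1) ((10:Int)^d') ((10:Int)^(d'+1)) hrep
    64 ((10:Int)^d') ((10:Int)^(d'+1)) hgap
    (le_refl _) (pow10_lt d' (d'+1) (by omega)) (le_refl _) (Or.inr rfl)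
    (by rw [htop]; exact hNd)
  have hdT : (((d':Int)+1)).toNat = d'+1 := by omega
  simp only [get_fizzbuzz_substring, get_fizzbuzz_substring_alt, hbeq', hdT]
  obtain ⟨hB1, hB2, hB3, hB4⟩ := hBin
  obtain ⟨hA1, hA2, hA3, hA4⟩ := hA
  have hcl : pvCalcStart ((10:Int)^d') = pvS d' := by
    rw [← hrep _ (le_refl _) (le_of_lt (pow10_lt d' (d'+1) (by omega))), pvSegLen_self]
    ring
  have honep : (1:Int) ≤ (10:Int)^d' := one_le_pow₀ (by norm_num)
  have hpowle : (10:Int)^(d'+1) ≤ (10:Int)^18 := pow10_le _ _ (by omega)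
  have hQB3 : pvCalcStart (pvBisectIn (s-1) (pvS d') ((d':Int)+1) ((10:Int)^d') 64 ((10:Int)^d') ((10:Int)^(d'+1))) ≤ s-1 ∨
      pvBisectIn (s-1) (pvS d') ((d':Int)+1) ((10:Int)^d') 64 ((10:Int)^d') ((10:Int)^(d'+1)) = 1 := by
    rcases hB3 with h | h
    · exact Or.inl h
    · rcases hdis with h0 | hle
      · refine Or.inr ?_
        rw [h, h0]
        norm_num
      · exact Or.inl (by rw [h, hcl]; exact hle)
  have hEq : pvBisect 64 (s-1) 1 ((10:Int)^18) =
      pvBisectIn (s-1) (pvS d') ((d':Int)+1) ((10:Int)^d') 64 ((10:Int)^d') ((10:Int)^(d'+1)) :=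
    Q_unique (s-1) _ _ hA1 (by omega) hA3 hA4 (by omega) (by omega) hQB3 hB4
  have hstart : pvS d' + pvSegLen ((d':Int)+1) ((10:Int)^d')
      (pvBisectIn (s-1) (pvS d') ((d':Int)+1) ((10:Int)^d') 64 ((10:Int)^d') ((10:Int)^(d'+1))) =
      pvCalcStart (pvBisectIn (s-1) (pvS d') ((d':Int)+1) ((10:Int)^d') 64 ((10:Int)^d') ((10:Int)^(d'+1))) :=
    hrep _ hB1 (by omega)
  rw [join_map_eq_foldl, hstart, ← hEq]
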